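-- pv_equiv track=rewrite | github.com/devbret/networked-rhyming-words | app.py | crude_orthographic_rhyme_key
-- ===== SOURCE A (Python) =====
-- def crude_orthographic_rhyme_key(word: str) -> str:
--     w = word.lower()
--     vowels = "aeiouy"
--     last_vowel_idx = -1
--     for i in range(len(w) - 1, -1, -1):
--         if w[i] in vowels:
--             last_vowel_idx = i
--             break
--     if last_vowel_idx == -1:
--         return w[-3:] if len(w) >= 3 else w
--     return w[last_vowel_idx:]
-- ===== SOURCE B (Python) =====
-- def crude_orthographic_rhyme_key(word: str) -> str:
--     w = word.lower()
--     key = ""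
--     for ch in reversed(w):
--         key = ch + key
--         if ch in "aeiouy":
--             return key
--     return w[-3:]
-- ===== Notes on version B (the rewrite author's own statement) =====
-- stated objective: alternative
-- what changed: B builds the rhyme key directly while walking the reversed word (prepending each character and returning as soon as a vowel is reached), instead of A's index-hunting loop followed by a slice; the no-vowel fallback collapses to w[-3:], which already equals w for short words.
import Mathlib
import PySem

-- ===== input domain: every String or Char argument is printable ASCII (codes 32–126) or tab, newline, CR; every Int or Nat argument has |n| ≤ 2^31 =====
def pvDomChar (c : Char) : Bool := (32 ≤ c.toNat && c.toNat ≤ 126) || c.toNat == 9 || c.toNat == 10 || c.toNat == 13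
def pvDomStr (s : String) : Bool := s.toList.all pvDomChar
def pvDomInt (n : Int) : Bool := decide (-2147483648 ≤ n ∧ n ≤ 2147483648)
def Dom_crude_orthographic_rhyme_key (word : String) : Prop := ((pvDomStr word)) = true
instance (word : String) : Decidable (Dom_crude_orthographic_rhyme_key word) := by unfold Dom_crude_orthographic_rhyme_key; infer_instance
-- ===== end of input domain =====

-- B builds the rhyme key directly while walking the reversed word, returning as soon as
-- a vowel is prepended, instead of A's index-hunting loop followed by a slice (objective: alternative).

-- ===== PORT A =====
def pvVowels : List Char := "aeiouy".toList

-- the 'for i in range(len(w)-1, -1, -1): if w[i] in vowels: last_vowel_idx = i; break' loop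
def pvALoop (w : List Char) : List Int → Int
  | [] => -1
  | i :: rest =>
    match PySem.List.pyGet? w i with
    | some c => if pvVowels.contains c then i else pvALoop w rest
    | none => -1   -- IndexError; unreachable, every range index is in bounds

def crude_orthographic_rhyme_key (word : String) : String :=
  let w := PySem.Str.lower word
  let lastVowelIdx := pvALoop w.toList (PySem.List.pyRange (PySem.Str.len w - 1) (-1) (-1))
  if lastVowelIdx == -1 then
    if PySem.Str.len w ≥ 3 then PySem.Str.slice w (some (-3)) none else w
  else
    PySem.Str.slice w (some lastVowelIdx) none

-- ===== PORT B =====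
def pvIsRhymeVowel (c : Char) : Bool := c == 'a' || c == 'e' || c == 'i' || c == 'o' || c == 'u' || c == 'y'

-- the 'for ch in reversed(w): key = ch + key; if ch in "aeiouy": return key' loop;
-- 'none' means the loop fell through (no vowel)
def pvBLoop : List Char → List Char → Option (List Char)
  | [], _ => none
  | c :: rest, key =>
    let key' := c :: key
    if pvIsRhymeVowel c then some key' else pvBLoop rest key'

def crude_orthographic_rhyme_key_alt (word : String) : String :=
  let w := PySem.Str.lower word
  match pvBLoop w.toList.reverse [] with
  | some key => String.ofList key
  | none => PySem.Str.slice w (some (-3)) none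

-- ===== PRECONDITION & SPEC =====
def Spec_crude_orthographic_rhyme_key (word : String) (out : String) : Prop := out = crude_orthographic_rhyme_key_alt word
instance (word : String) (out : String) : Decidable (Spec_crude_orthographic_rhyme_key word out) := by unfold Spec_crude_orthographic_rhyme_key; infer_instance

-- ===== CLAIM (what is proved, stated in full; the proofs are below) =====
def Claim_equal_crude_orthographic_rhyme_key : Prop := ∀ (word : String), Dom_crude_orthographic_rhyme_key word → Spec_crude_orthographic_rhyme_key word (crude_orthographic_rhyme_key word)

-- ===== LEMMAS AND PROOFS =====

-- proof-side characterisation: the index of the last vowel of L, if any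
def pvLastV : List Char → Option Nat
  | [] => none
  | x :: xs =>
    match pvLastV xs with
    | some i => some (i + 1)
    | none => if pvIsRhymeVowel x then some 0 else none

theorem pvVowel_mem (c : Char) : c ∈ pvVowels ↔ pvIsRhymeVowel c = true := by
  simp only [pvVowels, pvIsRhymeVowel]
  simp [Bool.beq_eq_decide_eq]
  tauto

theorem pvLastV_lt {L : List Char} {i : Nat} (h : pvLastV L = some i) : i < L.length := by
  induction L generalizing i with
  | nil => simp [pvLastV] at h
  | cons x xs ih =>
    simp only [pvLastV] at h
    cases hxs : pvLastV xs with
    | some j => rw [hxs] at h; simp at h; have := ih hxs; simp [List.length_cons]; omega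
    | none =>
      rw [hxs] at h
      split_ifs at h
      simp only [Option.some.injEq] at h
      simp only [List.length_cons]
      omega

theorem pvLastV_snoc (y : Char) (ys : List Char) :
    pvLastV (ys ++ [y]) = if pvIsRhymeVowel y then some ys.length else pvLastV ys := by
  induction ys with
  | nil => simp [pvLastV]
  | cons x xs ih =>
    simp only [List.cons_append, pvLastV, ih, List.length_cons]
    by_cases hy : pvIsRhymeVowel y
    · simp [hy]
    · simp [hy]

theorem pvALoop_congr (y : Char) (ys : List Char) (idxs : List Int)
    (h : ∀ i ∈ idxs, 0 ≤ i ∧ i < (ys.length : Int)) :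
    pvALoop (ys ++ [y]) idxs = pvALoop ys idxs := by
  induction idxs with
  | nil => rfl
  | cons i rest ih =>
    obtain ⟨h0, hlt⟩ := h i (by simp)
    have hi : i = ((i.toNat : Nat) : Int) := by omega
    have hget : PySem.List.pyGet? (ys ++ [y]) i = PySem.List.pyGet? ys i := by
      rw [hi, PySem.List.pyGet?_natCast, PySem.List.pyGet?_natCast,
        List.getElem?_append_left (by omega)]
    simp only [pvALoop, hget]
    cases PySem.List.pyGet? ys i with
    | none => rfl
    | some c =>
      by_cases hc : c ∈ pvVowels
      · simp [hc]
      · simp [hc, ih (fun j hj => h j (by simp [hj]))]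

theorem pvALoop_eq_lastV (L : List Char) :
    pvALoop L (PySem.List.pyRange ((L.length : Int) - 1) (-1) (-1)) =
      match pvLastV L with
      | some i => (i : Int)
      | none => -1 := by
  induction L using List.reverseRecOn with
  | nil => decide
  | append_singleton ys y ih =>
    have hlen : ((ys ++ [y]).length : Int) - 1 = (ys.length : Int) := by
      simp only [List.length_append, List.length_cons, List.length_nil]; omega
    rw [hlen, PySem.List.pyRange_neg_one_cons (by omega)]
    have hget : PySem.List.pyGet? (ys ++ [y]) (ys.length : Int) = some y := by
      rw [PySem.List.pyGet?_natCast]; simp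
    simp only [pvALoop, hget, pvLastV_snoc]
    by_cases hc : pvIsRhymeVowel y
    · simp [hc, (pvVowel_mem y).mpr hc]
    · have hmem : ¬ y ∈ pvVowels := fun hm => hc ((pvVowel_mem y).mp hm)
      have hcongr := pvALoop_congr y ys (PySem.List.pyRange ((ys.length : Int) - 1) (-1) (-1))
        (fun i hi => by rw [PySem.List.mem_pyRange_neg_one] at hi; omega)
      simp [hc, hmem, hcongr, ih]

theorem pvBLoop_eq_lastV (L : List Char) :
    ∀ acc : List Char,
      pvBLoop L.reverse acc = (pvLastV L).map (fun i => L.drop i ++ acc) := by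
  induction L using List.reverseRecOn with
  | nil => intro acc; simp [pvBLoop, pvLastV]
  | append_singleton ys y ih =>
    intro acc
    rw [List.reverse_append]
    simp only [List.reverse_cons, List.reverse_nil, List.nil_append, List.singleton_append,
      pvBLoop, pvLastV_snoc]
    by_cases hc : pvIsRhymeVowel y
    · simp only [hc, if_true, Option.map_some]
      have : (ys ++ [y]).drop ys.length = [y] := by
        simp
      rw [this]; rfl
    · simp only [hc, Bool.false_eq_true, if_false, ih (y :: acc)]
      cases hv : pvLastV ys with
      | none => simp
      | some i =>
        have hi : i < ys.length := pvLastV_lt hv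
        simp only [Option.map_some, Option.some.injEq]
        rw [List.drop_append_of_le_length (by omega)]
        simp

-- ===== VERDICT (by name: the statement is the Claim_ definition above) =====
theorem crude_orthographic_rhyme_key_spec : Claim_equal_crude_orthographic_rhyme_key := by
  intro word _
  unfold Spec_crude_orthographic_rhyme_key
  simp only [crude_orthographic_rhyme_key, crude_orthographic_rhyme_key_alt]
  set w := PySem.Str.lower word with hw
  rw [show PySem.Str.len w = (w.toList.length : Int) from by simp [PySem.Str.len_eq],
    pvALoop_eq_lastV, pvBLoop_eq_lastV]
  cases hv : pvLastV w.toList with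
  | none =>
    simp only [Option.map_none, beq_self_eq_true, if_true]
    by_cases h3 : (w.toList.length : Int) ≥ 3
    · rw [if_pos h3]
    · rw [if_neg h3]
      -- len < 3: Python's w[-3:] is all of w, so A's 'else w' branch equals B's slice
      have hl : PySem.List.slice w.toList (some (-3)) none = w.toList := by
        rw [PySem.List.slice_from_neg_ofNat _ 3 (by omega)]
        have h0 : w.toList.length - 3 = 0 := by omega
        rw [h0, List.drop_zero]
      have hsl : (PySem.Str.slice w (some (-3)) none).toList = w.toList := by
        rw [PySem.Str.toList_slice]
        exact hl
      have hs : PySem.Str.slice w (some (-3)) none = w := by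
        calc PySem.Str.slice w (some (-3)) none
            = String.ofList (PySem.Str.slice w (some (-3)) none).toList :=
              String.ofList_toList.symm
          _ = String.ofList w.toList := congrArg String.ofList hsl
          _ = w := String.ofList_toList
      exact hs.symm
  | some i =>
    have hne : ((i : Int) == (-1 : Int)) = false := by
      simp only [beq_eq_false_iff_ne, ne_eq]; omega
    simp only [Option.map_some, List.append_nil, hne, Bool.false_eq_true, if_false]
    have hsl : (PySem.Str.slice w (some (i : Int)) none).toList = w.toList.drop i := by
      rw [PySem.Str.toList_slice]
      exact PySem.List.slice_from_natCast w.toList i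
    calc PySem.Str.slice w (some (i : Int)) none
        = String.ofList (PySem.Str.slice w (some (i : Int)) none).toList :=
          String.ofList_toList.symm
      _ = String.ofList (w.toList.drop i) := congrArg String.ofList hsl
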